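-- pv_equiv track=rewrite | github.com/ali-aman-burki/typify | typify/preprocessing/precollector.py | _tokenize_name
-- ===== SOURCE A (Python) =====
-- def _tokenize_name(name: str) -> list[str]:
-- 	toks: list[str] = []
-- 	for part in name.split("_"):
-- 		if not part:
-- 			continue
-- 		chunk = []
-- 		last_is_upper = part[0].isupper()
-- 		start = 0
-- 		for i, ch in enumerate(part[1:], 1):
-- 			is_upper = ch.isupper()
-- 			if is_upper and not last_is_upper:
-- 				chunk.append(part[start:i])
-- 				start = i
-- 			last_is_upper = is_upper
-- 		chunk.append(part[start:])
-- 		toks.extend(tok.lower() for tok in chunk if tok)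
-- 	return toks
-- ===== SOURCE B (Python) =====
-- def _tokenize_name(name: str) -> list[str]:
--     toks = []
--     buf = ""
--     prev_upper = False
--     for ch in name:
--         if ch == '_' or (ch.isupper() and not prev_upper):
--             if buf:
--                 toks.append(buf)
--             buf = ""
--         if ch != '_':
--             buf += ch.lower()
--         prev_upper = ch.isupper()
--     if buf:
--         toks.append(buf)
--     return toks
-- ===== Notes on version B (the rewrite author's own statement) =====
-- stated objective: simpler
-- what changed: Replaces the underscore split plus a nested index/slice camelCase boundary scan per part with a single left-to-right pass over the whole string that keeps a current-token buffer and a previous-char-was-upper flag, flushing the buffer at separators and lower-to-upper boundaries.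
import Mathlib
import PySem

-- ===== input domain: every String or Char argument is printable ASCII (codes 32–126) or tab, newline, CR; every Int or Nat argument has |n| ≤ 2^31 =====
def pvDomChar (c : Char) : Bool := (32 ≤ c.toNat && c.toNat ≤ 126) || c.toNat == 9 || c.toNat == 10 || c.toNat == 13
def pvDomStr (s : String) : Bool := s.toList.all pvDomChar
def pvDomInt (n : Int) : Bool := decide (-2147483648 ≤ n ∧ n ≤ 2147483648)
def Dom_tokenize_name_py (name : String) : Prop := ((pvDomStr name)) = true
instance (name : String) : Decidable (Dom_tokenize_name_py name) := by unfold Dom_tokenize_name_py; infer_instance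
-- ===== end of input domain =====

-- B replaces A's split('_') + nested slice-based camelCase boundary scan by a single
-- one-pass accumulator loop over the characters; objective: simpler.

-- ===== PORT A =====
-- inner loop body of A: state (chunk, last_is_upper, start), element (i, ch)
def pvStepA (part : List Char) (st : List String × Bool × Int) (p : Int × Char) :
    List String × Bool × Int :=
  if PySem.Chars.isupper p.2 && !st.2.1 then
    (st.1 ++ [String.ofList (PySem.List.slice part (some st.2.2) (some p.1))],
     PySem.Chars.isupper p.2, p.1)
  else
    (st.1, PySem.Chars.isupper p.2, st.2.2)

-- per-part body of A's outer loop ('if not part: continue' is the [] case)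
def pvPartA (part : List Char) : List String :=
  match part with
  | [] => []
  | c :: rest =>
    let st := (PySem.List.enumerate rest 1).foldl (pvStepA part)
      ([], PySem.Chars.isupper c, (0 : Int))
    let chunk := st.1 ++ [String.ofList (PySem.List.slice part (some st.2.2) none)]
    (chunk.filter (fun t => t ≠ "")).map PySem.Str.lower

def tokenize_name_py (name : String) : List String :=
  (PySem.Chars.splitOn name.toList ['_']).foldl (fun toks part => toks ++ pvPartA part) []

-- ===== PORT B =====
-- loop body of B: state (toks, buf, prev_upper)
def pvStepB (st : List String × List Char × Bool) (ch : Char) :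
    List String × List Char × Bool :=
  let pair : List String × List Char :=
    if ch = '_' || (PySem.Chars.isupper ch && !st.2.2) then
      (if st.2.1 = [] then st.1 else st.1 ++ [String.ofList st.2.1], [])
    else (st.1, st.2.1)
  (pair.1,
   (if ch = '_' then pair.2 else pair.2 ++ [PySem.Chars.lowerChar ch]),
   PySem.Chars.isupper ch)

def tokenize_name_py_alt (name : String) : List String :=
  let st := name.toList.foldl pvStepB ([], [], false)
  st.1 ++ (if st.2.1 = [] then [] else [String.ofList st.2.1])

-- ===== PRECONDITION & SPEC =====
def Spec_tokenize_name_py (name : String) (out : List String) : Prop := out = tokenize_name_py_alt name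
instance (name : String) (out : List String) : Decidable (Spec_tokenize_name_py name out) := by unfold Spec_tokenize_name_py; infer_instance

-- ===== CLAIM (what is proved, stated in full; the proofs are below) =====
def Claim_equal_tokenize_name_py : Prop := ∀ (name : String), Dom_tokenize_name_py name → Spec_tokenize_name_py name (tokenize_name_py name)

-- ===== LEMMAS AND PROOFS =====

-- proof-side split of a char list on '_' : (first piece, remaining pieces)
def pvSplit : List Char → List Char × List (List Char)
  | [] => ([], [])
  | c :: t =>
    let p := pvSplit t
    if c = '_' then ([], p.1 :: p.2) else (c :: p.1, p.2)

def pvFlush (buf : List Char) : List String :=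
  if buf = [] then [] else [String.ofList buf]

-- direct-style version of B's loop
def pvSeg : Bool → List Char → List Char → List String
  | _, buf, [] => pvFlush buf
  | prev, buf, c :: t =>
    if c = '_' then pvFlush buf ++ pvSeg false [] t
    else if PySem.Chars.isupper c && !prev then
      pvFlush buf ++ pvSeg (PySem.Chars.isupper c) [PySem.Chars.lowerChar c] t
    else pvSeg (PySem.Chars.isupper c) (buf ++ [PySem.Chars.lowerChar c]) t

-- direct-style version of A's inner chunk builder (original-case tokens)
def pvRestTok : Bool → List Char → List Char → List String
  | _, buf, [] => [String.ofList buf]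
  | last, buf, c :: t =>
    if PySem.Chars.isupper c && !last then
      String.ofList buf :: pvRestTok (PySem.Chars.isupper c) [c] t
    else pvRestTok (PySem.Chars.isupper c) (buf ++ [c]) t

theorem pvOfList_ne_empty (l : List Char) (h : l ≠ []) : String.ofList l ≠ "" := by
  intro he
  apply h
  have : (String.ofList l).toList = ("" : String).toList := by rw [he]
  simpa using this

theorem pvLower_ofList (l : List Char) :
    PySem.Str.lower (String.ofList l) = String.ofList (PySem.Chars.lower l) := by
  apply String.toList_injective
  simp

-- fuel-indexed go of PySem.Chars.splitOn ↔ pvSplit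
theorem pvGo_eq (fuel : Nat) (l cur : List Char) (acc : List (List Char))
    (h : l.length < fuel) :
    PySem.Chars.splitOn.go ['_'] fuel l cur acc =
      acc.reverse ++ (cur.reverse ++ (pvSplit l).1) :: (pvSplit l).2 := by
  induction fuel generalizing l cur acc with
  | zero => omega
  | succ n ih =>
    cases l with
    | nil => simp [PySem.Chars.splitOn.go, pvSplit]
    | cons c rest =>
      by_cases hc : c = '_'
      · subst hc
        have hpre : List.isPrefixOf ['_'] ('_' :: rest) = true := by
          simp [List.isPrefixOf]
        rw [PySem.Chars.splitOn.go]
        simp only [hpre, if_pos, List.length, List.drop]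
        rw [ih rest [] (List.reverse cur :: acc) (by simpa using Nat.lt_of_succ_lt_succ h)]
        simp [pvSplit]
      · have hpre : List.isPrefixOf ['_'] (c :: rest) = false := by
          simp [List.isPrefixOf]
          intro hh
          exact hc hh.symm
        rw [PySem.Chars.splitOn.go]
        simp only [hpre]
        rw [if_neg (by simp)]
        rw [ih rest (c :: cur) acc (by simpa using Nat.lt_of_succ_lt_succ h)]
        simp [pvSplit, hc]

theorem pvSplitOn_eq (cs : List Char) :
    PySem.Chars.splitOn cs ['_'] = (pvSplit cs).1 :: (pvSplit cs).2 := by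
  unfold PySem.Chars.splitOn
  rw [pvGo_eq (cs.length + 1) cs [] [] (by omega)]
  simp

theorem pvSplit_nous (l : List Char) :
    ('_' ∉ (pvSplit l).1) ∧ (∀ p ∈ (pvSplit l).2, '_' ∉ p) := by
  induction l with
  | nil => simp [pvSplit]
  | cons c t ih =>
    by_cases hc : c = '_'
    · subst hc
      have hs : pvSplit ('_' :: t) = ([], (pvSplit t).1 :: (pvSplit t).2) := by
        simp [pvSplit]
      rw [hs]
      refine ⟨by simp, ?_⟩
      intro p hp
      rw [List.mem_cons] at hp
      rcases hp with rfl | hp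
      · exact ih.1
      · exact ih.2 p hp
    · have hs : pvSplit (c :: t) = (c :: (pvSplit t).1, (pvSplit t).2) := by
        simp [pvSplit, hc]
      rw [hs]
      exact ⟨by simp [List.mem_cons, ih.1, Ne.symm hc], ih.2⟩

theorem pvFoldl_flat (parts : List (List Char)) (toks : List String) :
    parts.foldl (fun a p => a ++ pvPartA p) toks = toks ++ parts.flatMap pvPartA := by
  induction parts generalizing toks with
  | nil => simp
  | cons p r ih => simp [ih]

theorem pvSeg_decomp (l : List Char) (prev : Bool) (buf : List Char) :
    pvSeg prev buf l =
      pvSeg prev buf (pvSplit l).1 ++ ((pvSplit l).2).flatMap (pvSeg false []) := by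
  induction l generalizing prev buf with
  | nil => simp [pvSplit, pvSeg]
  | cons c t ih =>
    by_cases hc : c = '_'
    · subst hc
      have hs : pvSplit ('_' :: t) = ([], (pvSplit t).1 :: (pvSplit t).2) := by
        simp [pvSplit]
      rw [hs]
      have hseg : pvSeg prev buf ('_' :: t) = pvFlush buf ++ pvSeg false [] t := by
        simp [pvSeg]
      rw [hseg, ih]
      simp [pvSeg]
    · have hs : pvSplit (c :: t) = (c :: (pvSplit t).1, (pvSplit t).2) := by
        simp [pvSplit, hc]
      rw [hs]
      by_cases hu : (PySem.Chars.isupper c && !prev) = true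
      · have e1 : ∀ l', pvSeg prev buf (c :: l') =
            pvFlush buf ++ pvSeg (PySem.Chars.isupper c) [PySem.Chars.lowerChar c] l' := by
          intro l'; simp [pvSeg, hc, hu]
        rw [e1, e1, ih]
        simp [List.append_assoc]
      · have hu' : (PySem.Chars.isupper c && !prev) = false := eq_false_of_ne_true hu
        have e1 : ∀ l', pvSeg prev buf (c :: l') =
            pvSeg (PySem.Chars.isupper c) (buf ++ [PySem.Chars.lowerChar c]) l' := by
          intro l'; simp [pvSeg, hc, hu']
        rw [e1, e1, ih]

theorem pvB_eq (l : List Char) (toks : List String) (buf : List Char) (prev : Bool) :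
    (l.foldl pvStepB (toks, buf, prev)).1 ++ pvFlush (l.foldl pvStepB (toks, buf, prev)).2.1
      = toks ++ pvSeg prev buf l := by
  induction l generalizing toks buf prev with
  | nil => simp [pvSeg]
  | cons c t ih =>
    rw [List.foldl_cons]
    by_cases hc : c = '_'
    · subst hc
      have e : pvStepB (toks, buf, prev) '_' =
          ((if buf = [] then toks else toks ++ [String.ofList buf]), [], PySem.Chars.isupper '_') := by
        simp [pvStepB]
      rw [e, show PySem.Chars.isupper '_' = false from by decide, ih]
      have hseg : pvSeg prev buf ('_' :: t) = pvFlush buf ++ pvSeg false [] t := by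
        simp [pvSeg]
      rw [hseg]
      by_cases hb : buf = [] <;> simp [hb, pvFlush]
    · by_cases hu : (PySem.Chars.isupper c && !prev) = true
      · have e : pvStepB (toks, buf, prev) c =
            ((if buf = [] then toks else toks ++ [String.ofList buf]),
             [PySem.Chars.lowerChar c], PySem.Chars.isupper c) := by
          simp [pvStepB, hc, hu]
        rw [e, ih]
        have hseg : pvSeg prev buf (c :: t) =
            pvFlush buf ++ pvSeg (PySem.Chars.isupper c) [PySem.Chars.lowerChar c] t := by
          simp [pvSeg, hc, hu]
        rw [hseg]
        by_cases hb : buf = [] <;> simp [hb, pvFlush]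
      · have hu' : (PySem.Chars.isupper c && !prev) = false := eq_false_of_ne_true hu
        have e : pvStepB (toks, buf, prev) c =
            (toks, buf ++ [PySem.Chars.lowerChar c], PySem.Chars.isupper c) := by
          simp [pvStepB, hc, hu']
        rw [e, ih]
        have hseg : pvSeg prev buf (c :: t) =
            pvSeg (PySem.Chars.isupper c) (buf ++ [PySem.Chars.lowerChar c]) t := by
          simp [pvSeg, hc, hu']
        rw [hseg]

theorem pvInnerA (cs : List Char) (t : List Char) :
    ∀ (k start : Nat) (chunk : List String) (last : Bool), start ≤ k → cs.drop k = t →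
    ((PySem.List.enumerate t (k : Int)).foldl (pvStepA cs) (chunk, last, (start : Int))).1
      ++ [String.ofList (PySem.List.slice cs
            (some ((PySem.List.enumerate t (k : Int)).foldl (pvStepA cs) (chunk, last, (start : Int))).2.2) none)]
    = chunk ++ pvRestTok last ((cs.drop start).take (k - start)) t := by
  induction t with
  | nil =>
    intro k start chunk last hsk hdrop
    simp only [PySem.List.enumerate, List.foldl_nil, pvRestTok]
    rw [PySem.List.slice_from_natCast]
    have hlen : cs.length ≤ k := by
      have := congrArg List.length hdrop
      simp at this; omega
    rw [List.take_of_length_le (by simp; omega)]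
  | cons c t' ih =>
    intro k start chunk last hsk hdrop
    have hget : cs[k]? = some c := by
      have : (cs.drop k)[0]? = some c := by rw [hdrop]; rfl
      simpa using this
    have hdrop' : cs.drop (k + 1) = t' := by
      have h1 : (cs.drop k).tail = t' := by rw [hdrop]; rfl
      rw [← h1, List.tail_drop]
    have hkk : ((k : Int) + 1) = ((k + 1 : Nat) : Int) := by push_cast; ring
    rw [PySem.List.enumerate_cons]
    simp only [List.foldl_cons]
    by_cases hu : (PySem.Chars.isupper c && !last) = true
    · have e : pvStepA cs (chunk, last, (start : Int)) ((k : Int), c) =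
          (chunk ++ [String.ofList (PySem.List.slice cs (some (start : Int)) (some (k : Int)))],
           PySem.Chars.isupper c, (k : Int)) := by
        simp [pvStepA, hu]
      rw [e, hkk, ih (k + 1) k _ _ (by omega) hdrop']
      have h1 : (cs.drop k).take (k + 1 - k) = [c] := by
        rw [show k + 1 - k = 1 by omega, hdrop]; rfl
      rw [h1]
      simp only [pvRestTok, hu, if_pos]
      rw [PySem.List.slice_natCast]
      simp [List.append_assoc]
    · have hu' : (PySem.Chars.isupper c && !last) = false := eq_false_of_ne_true hu
      have e : pvStepA cs (chunk, last, (start : Int)) ((k : Int), c) =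
          (chunk, PySem.Chars.isupper c, (start : Int)) := by
        simp [pvStepA, hu']
      rw [e, hkk, ih (k + 1) start _ _ (by omega) hdrop']
      have h2 : (cs.drop start).take (k + 1 - start) =
          (cs.drop start).take (k - start) ++ [c] := by
        rw [show k + 1 - start = (k - start) + 1 by omega, List.take_add_one]
        have h3 : (cs.drop start)[k - start]? = some c := by
          rw [List.getElem?_drop, show start + (k - start) = k by omega, hget]
        rw [h3]; rfl
      rw [h2]
      simp only [pvRestTok, hu']
      rfl

theorem pvSegRest (t : List Char) :
    ∀ (last : Bool) (buf : List Char), '_' ∉ t → buf ≠ [] →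
    pvSeg last (PySem.Chars.lower buf) t =
      ((pvRestTok last buf t).filter (fun s => s ≠ "")).map PySem.Str.lower := by
  induction t with
  | nil =>
    intro last buf _ hb
    have h1 : PySem.Chars.lower buf ≠ [] := by simp [PySem.Chars.lower, hb]
    simp [pvSeg, pvRestTok, pvFlush, h1, pvOfList_ne_empty buf hb, pvLower_ofList]
  | cons c t' ih =>
    intro last buf hnu hb
    have hc : c ≠ '_' := by intro h; exact hnu (by simp [h])
    have hnu' : '_' ∉ t' := by intro h; exact hnu (by simp [h])
    by_cases hu : (PySem.Chars.isupper c && !last) = true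
    · simp only [pvSeg, if_neg hc, hu, if_pos, pvRestTok]
      have h1 : PySem.Chars.lower buf ≠ [] := by simp [PySem.Chars.lower, hb]
      rw [show [PySem.Chars.lowerChar c] = PySem.Chars.lower [c] from rfl]
      rw [ih _ _ hnu' (by simp)]
      simp [pvFlush, h1, pvOfList_ne_empty buf hb, pvLower_ofList]
    · simp only [pvSeg, if_neg hc, if_neg (by simp_all : ¬ (PySem.Chars.isupper c && !last) = true), pvRestTok]
      rw [show PySem.Chars.lower buf ++ [PySem.Chars.lowerChar c] = PySem.Chars.lower (buf ++ [c]) by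
        simp [PySem.Chars.lower]]
      rw [ih _ _ hnu' (by simp)]

theorem pvPart_eq (p : List Char) (h : '_' ∉ p) : pvPartA p = pvSeg false [] p := by
  cases p with
  | nil => simp [pvPartA, pvSeg, pvFlush]
  | cons c rest =>
    have hc : c ≠ '_' := by intro hh; exact h (by simp [hh])
    have hrest : '_' ∉ rest := by intro hh; exact h (by simp [hh])
    have hinner := pvInnerA (c :: rest) rest 1 0 [] (PySem.Chars.isupper c) (by omega) (by rfl)
    simp only at hinner
    have hA : pvPartA (c :: rest) =
        ((pvRestTok (PySem.Chars.isupper c) [c] rest).filter (fun s => s ≠ "")).map PySem.Str.lower := by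
      simp only [pvPartA]
      simp only [Nat.cast_zero, Nat.cast_one] at hinner
      rw [hinner]
      simp
    have hB : pvSeg false [] (c :: rest) =
        pvSeg (PySem.Chars.isupper c) [PySem.Chars.lowerChar c] rest := by
      by_cases hu : PySem.Chars.isupper c = true
      · simp [pvSeg, hc, hu, pvFlush]
      · simp [pvSeg, hc, hu]
    rw [hA, hB]
    rw [show [PySem.Chars.lowerChar c] = PySem.Chars.lower [c] from rfl]
    exact (pvSegRest rest (PySem.Chars.isupper c) [c] hrest (by simp)).symm

theorem pvFlatMap_congr (r : List (List Char)) (h : ∀ p ∈ r, '_' ∉ p) :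
    r.flatMap pvPartA = r.flatMap (pvSeg false []) := by
  induction r with
  | nil => rfl
  | cons p r' ih =>
    simp only [List.flatMap_cons]
    rw [pvPart_eq p (h p (by simp)), ih (fun q hq => h q (by simp [hq]))]

theorem tokenize_name_py_spec : Claim_equal_tokenize_name_py := by
  intro name _
  unfold Spec_tokenize_name_py tokenize_name_py tokenize_name_py_alt
  rw [pvSplitOn_eq]
  rw [pvFoldl_flat]
  have hB := pvB_eq name.toList [] [] false
  simp only [pvFlush, List.nil_append] at hB ⊢
  rw [hB]
  rw [pvSeg_decomp name.toList false []]
  have hno := pvSplit_nous name.toList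
  rw [List.flatMap_cons, pvPart_eq _ hno.1, pvFlatMap_congr _ hno.2]
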